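-- pv_equiv track=rewrite | github.com/fernandoestay-create/beneficios-bancarios-chile | scrapers.py | _extraer_dias
-- ===== SOURCE A (Python) =====
-- from typing import List, Dict, Any, Optional
--
-- def _extraer_dias(texto: str) -> List[str]:
--     """Extrae dias de la semana del texto"""
--     dias_map = {
--         'lunes': 'lunes', 'martes': 'martes', 'miércoles': 'miercoles',
--         'miercoles': 'miercoles', 'jueves': 'jueves', 'viernes': 'viernes',
--         'sábado': 'sabado', 'sabado': 'sabado', 'domingo': 'domingo',
--     }
--     encontrados = []
--     texto_lower = texto.lower()
--     for nombre, dia in dias_map.items():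
--         if nombre in texto_lower and dia not in encontrados:
--             encontrados.append(dia)
--     return encontrados
-- ===== SOURCE B (Python) =====
-- def _extraer_dias(texto):
--     """Extrae dias de la semana del texto"""
--     alias_de = [('lunes', 'lunes'), ('martes', 'martes'), ('miércoles', 'miercoles'),
--                 ('miercoles', 'miercoles'), ('jueves', 'jueves'), ('viernes', 'viernes'),
--                 ('sábado', 'sabado'), ('sabado', 'sabado'), ('domingo', 'domingo')]
--     t = texto.lower()
--     hallados = set()
--     for i in range(len(t)):
--         for alias, dia in alias_de:
--             if t[i:i + len(alias)] == alias:
--                 hallados.add(dia)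
--     return [d for d in ('lunes', 'martes', 'miercoles', 'jueves', 'viernes', 'sabado', 'domingo')
--             if d in hallados]
-- ===== Notes on version B (the rewrite author's own statement) =====
-- stated objective: alternative
-- what changed: Text-driven naive multi-pattern scan: one left-to-right pass over positions of the lowered text matches all aliases at each position into a set of found days, then the canonical day list is filtered by set membership, replacing A's per-alias substring searches with an accumulator dedup scan.
import Mathlib
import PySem

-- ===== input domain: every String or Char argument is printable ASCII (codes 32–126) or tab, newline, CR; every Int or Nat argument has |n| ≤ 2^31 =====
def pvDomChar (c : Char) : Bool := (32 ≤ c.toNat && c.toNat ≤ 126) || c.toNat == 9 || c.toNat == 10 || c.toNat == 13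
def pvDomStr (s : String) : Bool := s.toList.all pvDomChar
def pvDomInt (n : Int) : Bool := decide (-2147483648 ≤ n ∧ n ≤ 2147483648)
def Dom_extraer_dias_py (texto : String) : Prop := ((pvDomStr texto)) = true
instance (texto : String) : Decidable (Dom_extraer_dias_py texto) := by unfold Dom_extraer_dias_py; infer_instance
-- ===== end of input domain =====

-- B scans the text left to right once, matching every alias at each position into a
-- set of found days, instead of A's one substring search per alias (objective: alternative).

-- ===== PORT A =====
def extraer_dias_py (texto : String) : List String :=
  let dias_map : PySem.Dict String String := PySem.Dict.ofList
    [("lunes", "lunes"), ("martes", "martes"), ("miércoles", "miercoles"),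
     ("miercoles", "miercoles"), ("jueves", "jueves"), ("viernes", "viernes"),
     ("sábado", "sabado"), ("sabado", "sabado"), ("domingo", "domingo")]
  let texto_lower := PySem.Str.lower texto
  dias_map.items.foldl (fun encontrados p =>
    if PySem.Str.isIn p.1 texto_lower && !(encontrados.contains p.2) then
      encontrados ++ [p.2]
    else encontrados) []

-- ===== PORT B =====
def pvAliasDe : List (String × String) :=
  [("lunes", "lunes"), ("martes", "martes"), ("miércoles", "miercoles"),
   ("miercoles", "miercoles"), ("jueves", "jueves"), ("viernes", "viernes"),
   ("sábado", "sabado"), ("sabado", "sabado"), ("domingo", "domingo")]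

-- t[i:i + len(alias)] == alias is ported as take (len alias) (drop i) on the char list:
-- exact, since i produced by range(len(t)) satisfies 0 ≤ i ≤ len(t).
def extraer_dias_py_alt (texto : String) : List String :=
  let t := PySem.Str.lower texto
  let hallados : PySem.Set String :=
    (PySem.List.pyRange 0 (PySem.Str.len t) 1).foldl (fun s i =>
      pvAliasDe.foldl (fun s p =>
        if (t.toList.drop i.toNat).take p.1.toList.length = p.1.toList then s.add p.2
        else s) s)
      PySem.Set.empty
  ["lunes", "martes", "miercoles", "jueves", "viernes", "sabado", "domingo"].filter
    (fun d => PySem.Set.contains hallados d)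

-- ===== PRECONDITION & SPEC =====
def Spec_extraer_dias_py (texto : String) (out : List String) : Prop := out = extraer_dias_py_alt texto
instance (texto : String) (out : List String) : Decidable (Spec_extraer_dias_py texto out) := by unfold Spec_extraer_dias_py; infer_instance

-- ===== CLAIM (what is proved, stated in full; the proofs are below) =====
def Claim_equal_extraer_dias_py : Prop := ∀ (texto : String), Dom_extraer_dias_py texto → Spec_extraer_dias_py texto (extraer_dias_py texto)

-- ===== LEMMAS AND PROOFS =====
-- The 9-key alias dict has distinct keys, so its item list is the literal list.
lemma pvItems_eval :
    (PySem.Dict.ofList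
      [("lunes", "lunes"), ("martes", "martes"), ("miércoles", "miercoles"),
       ("miercoles", "miercoles"), ("jueves", "jueves"), ("viernes", "viernes"),
       ("sábado", "sabado"), ("sabado", "sabado"), ("domingo", "domingo")]).items
    = pvAliasDe := by
  decide

-- A's fold, rewritten as a fold over the precomputed match-booleans of each alias.
lemma pvFoldA_as_map (tl : String) (l : List (String × String)) :
    l.foldl (fun encontrados p =>
      if PySem.Str.isIn p.1 tl && !(encontrados.contains p.2) then
        encontrados ++ [p.2]
      else encontrados) []
    = (l.map (fun p => (PySem.Str.isIn p.1 tl, p.2))).foldl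
        (fun encontrados q =>
          if q.1 && !(encontrados.contains q.2) then encontrados ++ [q.2]
          else encontrados) [] := by
  rw [List.foldl_map]

-- Membership in a fold that conditionally adds one element per item.
lemma pvMem_foldl_addIf {α : Type} (L : List α) (c : α → Prop) [DecidablePred c]
    (v : α → String) (s : PySem.Set String) (d : String) :
    (d ∈ L.foldl (fun s x => if c x then PySem.Set.add s (v x) else s) s)
      ↔ d ∈ s ∨ ∃ x ∈ L, c x ∧ v x = d := by
  induction L generalizing s with
  | nil => simp
  | cons a L ih =>
    rw [List.foldl_cons]
    by_cases h : c a
    · rw [if_pos h, ih]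
      simp only [PySem.Set.mem_add, List.mem_cons]
      constructor
      · rintro ((hs | hv) | ⟨x, hx, hc, hvx⟩)
        · exact Or.inl hs
        · exact Or.inr ⟨a, Or.inl rfl, h, hv.symm⟩
        · exact Or.inr ⟨x, Or.inr hx, hc, hvx⟩
      · rintro (hs | ⟨x, hx | hx, hc, hvx⟩)
        · exact Or.inl (Or.inl hs)
        · exact Or.inl (Or.inr (by rw [← hx, hvx]))
        · exact Or.inr ⟨x, hx, hc, hvx⟩
    · rw [if_neg h, ih]
      simp only [List.mem_cons]
      constructor
      · rintro (hs | ⟨x, hx, hc, hvx⟩)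
        · exact Or.inl hs
        · exact Or.inr ⟨x, Or.inr hx, hc, hvx⟩
      · rintro (hs | ⟨x, hx | hx, hc, hvx⟩)
        · exact Or.inl hs
        · exact absurd (hx ▸ hc) h
        · exact Or.inr ⟨x, hx, hc, hvx⟩

-- Membership in B's nested fold: some position, some alias, matched there.
lemma pvMem_foldl_nested (L : List Int) (t : List Char) (s : PySem.Set String) (d : String) :
    (d ∈ L.foldl (fun s i =>
        pvAliasDe.foldl (fun s p =>
          if (t.drop i.toNat).take p.1.toList.length = p.1.toList then PySem.Set.add s p.2
          else s) s) s)
      ↔ d ∈ s ∨ ∃ i ∈ L, ∃ p ∈ pvAliasDe,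
          (t.drop i.toNat).take p.1.toList.length = p.1.toList ∧ p.2 = d := by
  induction L generalizing s with
  | nil => simp
  | cons a L ih =>
    rw [List.foldl_cons, ih,
      pvMem_foldl_addIf pvAliasDe
        (fun p => (t.drop a.toNat).take p.1.toList.length = p.1.toList) Prod.snd s d]
    simp only [List.mem_cons]
    constructor
    · rintro ((hs | ⟨p, hp, hc, hv⟩) | ⟨i, hi, hrest⟩)
      · exact Or.inl hs
      · exact Or.inr ⟨a, Or.inl rfl, p, hp, hc, hv⟩
      · exact Or.inr ⟨i, Or.inr hi, hrest⟩
    · rintro (hs | ⟨i, hi | hi, p, hp, hc, hv⟩)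
      · exact Or.inl (Or.inl hs)
      · exact Or.inl (Or.inr ⟨p, hp, hi ▸ hc, hv⟩)
      · exact Or.inr ⟨i, hi, p, hp, hc, hv⟩

-- A nonempty pattern occurs at some scanned position iff it is a substring.
lemma pvOccurs_iff (a t : List Char) (ha : a ≠ []) :
    (∃ i ∈ PySem.List.pyRange 0 (t.length : Int) 1,
        (t.drop i.toNat).take a.length = a)
      ↔ PySem.Chars.isIn a t = true := by
  rw [← PySem.Chars.exists_prefix_drop_iff_isIn]
  constructor
  · rintro ⟨i, hi, htk⟩
    exact ⟨i.toNat, (List.prefix_iff_eq_take).2 htk.symm⟩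
  · rintro ⟨j, hj⟩
    have hjlt : j < t.length := by
      rcases Nat.lt_or_ge j t.length with h | h
      · exact h
      · rw [List.drop_eq_nil_of_le h] at hj
        exact absurd (List.prefix_nil.1 hj) ha
    refine ⟨(j : Int), ?_, ?_⟩
    · rw [PySem.List.mem_pyRange_one]
      omega
    · simpa using ((List.prefix_iff_eq_take).1 hj).symm

-- Membership of a day in B's found-set, phrased with Str.isIn per alias.
lemma pvHallados_mem (texto : String) (d : String) :
    (d ∈ (PySem.List.pyRange 0 (PySem.Str.len (PySem.Str.lower texto)) 1).foldl (fun s i =>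
        pvAliasDe.foldl (fun s p =>
          if ((PySem.Str.lower texto).toList.drop i.toNat).take p.1.toList.length = p.1.toList
          then PySem.Set.add s p.2 else s) s) PySem.Set.empty)
      ↔ ∃ p ∈ pvAliasDe, PySem.Str.isIn p.1 (PySem.Str.lower texto) = true ∧ p.2 = d := by
  rw [pvMem_foldl_nested]
  simp only [PySem.Set.empty, List.not_mem_nil, false_or]
  constructor
  · rintro ⟨i, hi, p, hp, hm, hv⟩
    refine ⟨p, hp, ?_, hv⟩
    rw [PySem.Str.isIn_eq,
      ← pvOccurs_iff p.1.toList (PySem.Str.lower texto).toList (by fin_cases hp <;> decide)]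
    refine ⟨i, ?_, hm⟩
    simpa [PySem.Str.len_eq] using hi
  · rintro ⟨p, hp, hin, hv⟩
    rw [PySem.Str.isIn_eq,
      ← pvOccurs_iff p.1.toList (PySem.Str.lower texto).toList
        (by fin_cases hp <;> decide)] at hin
    rcases hin with ⟨i, hi, hm⟩
    refine ⟨i, ?_, p, hp, hm, hv⟩
    simpa [PySem.Str.len_eq] using hi

-- A set's contains equals any boolean equivalent to its membership.
lemma pvContains_eq_of_iff (s : PySem.Set String) (d : String) (b : Bool)
    (h : d ∈ s ↔ b = true) : PySem.Set.contains s d = b := by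
  cases b with
  | false =>
    cases hc : PySem.Set.contains s d
    · rfl
    · exact absurd (h.1 ((PySem.Set.contains_iff s d).1 hc)) (by simp)
  | true => exact (PySem.Set.contains_iff s d).2 (h.2 rfl)

-- ===== VERDICT (by name: the statement is the Claim_ definition above) =====
theorem extraer_dias_py_spec : Claim_equal_extraer_dias_py := by
  intro texto _
  unfold Spec_extraer_dias_py
  simp only [extraer_dias_py, extraer_dias_py_alt]
  rw [pvItems_eval, pvFoldA_as_map (PySem.Str.lower texto)]
  have h1 := pvContains_eq_of_iff _ "lunes" (PySem.Str.isIn "lunes" (PySem.Str.lower texto))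
    ((pvHallados_mem texto "lunes").trans (by simp [pvAliasDe]))
  have h2 := pvContains_eq_of_iff _ "martes" (PySem.Str.isIn "martes" (PySem.Str.lower texto))
    ((pvHallados_mem texto "martes").trans (by simp [pvAliasDe]))
  have h3 := pvContains_eq_of_iff _ "miercoles"
    (PySem.Str.isIn "miércoles" (PySem.Str.lower texto) || PySem.Str.isIn "miercoles" (PySem.Str.lower texto))
    ((pvHallados_mem texto "miercoles").trans (by simp [pvAliasDe, Bool.or_eq_true]))
  have h4 := pvContains_eq_of_iff _ "jueves" (PySem.Str.isIn "jueves" (PySem.Str.lower texto))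
    ((pvHallados_mem texto "jueves").trans (by simp [pvAliasDe]))
  have h5 := pvContains_eq_of_iff _ "viernes" (PySem.Str.isIn "viernes" (PySem.Str.lower texto))
    ((pvHallados_mem texto "viernes").trans (by simp [pvAliasDe]))
  have h6 := pvContains_eq_of_iff _ "sabado"
    (PySem.Str.isIn "sábado" (PySem.Str.lower texto) || PySem.Str.isIn "sabado" (PySem.Str.lower texto))
    ((pvHallados_mem texto "sabado").trans (by simp [pvAliasDe, Bool.or_eq_true]))
  have h7 := pvContains_eq_of_iff _ "domingo" (PySem.Str.isIn "domingo" (PySem.Str.lower texto))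
    ((pvHallados_mem texto "domingo").trans (by simp [pvAliasDe]))
  simp only [List.filter_cons, List.filter_nil, h1, h2, h3, h4, h5, h6, h7]
  simp only [pvAliasDe, List.map_cons, List.map_nil]
  generalize PySem.Str.isIn "lunes" (PySem.Str.lower texto) = b1
  generalize PySem.Str.isIn "martes" (PySem.Str.lower texto) = b2
  generalize PySem.Str.isIn "mi\u00e9rcoles" (PySem.Str.lower texto) = b3
  generalize PySem.Str.isIn "miercoles" (PySem.Str.lower texto) = b4
  generalize PySem.Str.isIn "jueves" (PySem.Str.lower texto) = b5
  generalize PySem.Str.isIn "viernes" (PySem.Str.lower texto) = b6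
  generalize PySem.Str.isIn "s\u00e1bado" (PySem.Str.lower texto) = b7
  generalize PySem.Str.isIn "sabado" (PySem.Str.lower texto) = b8
  generalize PySem.Str.isIn "domingo" (PySem.Str.lower texto) = b9
  revert b1 b2 b3 b4 b5 b6 b7 b8 b9
  decide
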